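-- pv_equiv track=rewrite | github.com/gbcolborne/ner_eval | data_utils/make_ontonotes_BIO2.py | transform_onto_tags
-- ===== SOURCE A (Python) =====
-- def transform_onto_tags(lst):
--     """Convert bracketed tokens of an OntoNotes file (CoNLL-2012 dataset)
--     to a list of BIO-2 labels.
--
--     """
--     tags = ["O"] * len(lst)
--     flag = False
--     cur = "O"
--     for i in range(len(lst)):
--         if lst[i][0] == "(" and not flag:
--             cur = lst[i].replace("(", "").replace(")", "").replace("*", "")
--             tags[i] = "B-" + cur
--             if lst[i][-1] != ")":
--                 flag = True
--
--         elif flag and lst[i].startswith("*"):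
--             tags[i] = "I-" + cur
--             if lst[i][-1] == ")":
--                 flag = False
--     return tags
-- ===== SOURCE B (Python) =====
-- def transform_onto_tags(lst):
--     """Convert bracketed tokens of an OntoNotes file (CoNLL-2012 dataset)
--     to a list of BIO-2 labels."""
--     n = len(lst)
--     tags = ["O"] * n
--     # index of all tokens that can close an open span
--     closers = [i for i in range(n)
--                if lst[i].startswith("*") and lst[i].endswith(")")]
--     p = 0
--     while p < n:
--         if lst[p][0] == "(":
--             tag = lst[p].replace("(", "").replace(")", "").replace("*", "")
--             tags[p] = "B-" + tag
--             if not lst[p].endswith(")"):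
--                 end = next((j for j in closers if j > p), n - 1)
--                 for q in range(p + 1, end + 1):
--                     if lst[q].startswith("*"):
--                         tags[q] = "I-" + tag
--                 p = end
--         p += 1
--     return tags
-- ===== Notes on version B (the rewrite author's own statement) =====
-- stated objective: alternative
-- what changed: A is a token-by-token state machine carrying a flag/cur state across the whole list; B first builds an index of all span-closing tokens ('*...)'), then jumps from each opening '(' token directly to its closer found in that index and paints the interval in between, skipping state tracking.
import Mathlib
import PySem

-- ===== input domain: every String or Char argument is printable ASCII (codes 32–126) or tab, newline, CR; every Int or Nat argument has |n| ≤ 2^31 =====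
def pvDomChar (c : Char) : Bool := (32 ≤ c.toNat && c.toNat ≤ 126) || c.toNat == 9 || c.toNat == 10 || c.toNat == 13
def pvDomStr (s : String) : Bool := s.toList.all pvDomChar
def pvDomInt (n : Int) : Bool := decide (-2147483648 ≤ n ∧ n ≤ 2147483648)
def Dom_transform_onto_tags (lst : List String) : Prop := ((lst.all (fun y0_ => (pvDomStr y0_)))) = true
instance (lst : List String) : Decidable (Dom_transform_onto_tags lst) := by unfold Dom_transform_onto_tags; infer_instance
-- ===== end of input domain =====

-- B replaces A's token-by-token flag/cur state machine by a precomputed index of the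
-- span-closing tokens: each opener jumps straight to its closer found in that index and
-- the interval in between is painted (objective: alternative, same cost).

-- ===== PORT A =====
-- lst[i].replace("(","").replace(")","").replace("*","")  (identical text in A and B)
def pvClean (tok : String) : String :=
  PySem.Str.replace (PySem.Str.replace (PySem.Str.replace tok "(" "") ")" "") "*" ""

-- the 'for i in range(len(lst))' loop of A with its state (tags, flag, cur)
def aLoop (lst : List String) : List Nat → List String → Bool → String → List String
  | [], tags, _, _ => tags
  | i :: rest, tags, flag, cur =>
    let tok := lst.getD i ""
    if (PySem.Str.pyGet? tok 0 == some '(') && !flag then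
      let cur' := pvClean tok
      let tags' := tags.set i ("B-" ++ cur')
      if PySem.Str.pyGet? tok (-1) != some ')' then
        aLoop lst rest tags' true cur'
      else
        aLoop lst rest tags' false cur'
    else if flag && PySem.Str.startswith tok "*" then
      let tags' := tags.set i ("I-" ++ cur)
      if PySem.Str.pyGet? tok (-1) == some ')' then
        aLoop lst rest tags' false cur
      else
        aLoop lst rest tags' true cur
    else
      aLoop lst rest tags flag cur

def transform_onto_tags (lst : List String) : List String :=
  aLoop lst (List.range lst.length) (List.replicate lst.length "O") false "O"

-- ===== PORT B =====
-- closers = [i for i in range(n) if lst[i].startswith("*") and lst[i].endswith(")")]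
def closersOf (lst : List String) : List Nat :=
  (List.range lst.length).filter
    (fun i => PySem.Str.startswith (lst.getD i "") "*" && PySem.Str.endswith (lst.getD i "") ")")

-- for q in range(p+1, end+1): if lst[q].startswith("*"): tags[q] = "I-"+tag
def paint (lst : List String) (tag : String) (lo hi : Nat) (tags : List String) : List String :=
  (List.range' lo (hi + 1 - lo)).foldl
    (fun tg q => if PySem.Str.startswith (lst.getD q "") "*" then tg.set q ("I-" ++ tag) else tg)
    tags

-- B's while loop; p strictly increases each iteration, so fuel = n suffices
def bLoop (lst : List String) (closers : List Nat) : Nat → List String → Nat → List String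
  | _, tags, 0 => tags
  | p, tags, fuel+1 =>
    if p < lst.length then
      let tok := lst.getD p ""
      if PySem.Str.pyGet? tok 0 == some '(' then
        let tag := pvClean tok
        let tags' := tags.set p ("B-" ++ tag)
        if PySem.Str.endswith tok ")" then bLoop lst closers (p+1) tags' fuel
        else
          -- end = next((j for j in closers if j > p), n - 1)
          let e := (closers.find? (fun j => decide (p < j))).getD (lst.length - 1)
          bLoop lst closers (e+1) (paint lst tag (p+1) e tags') fuel
      else bLoop lst closers (p+1) tags fuel
    else tags

def transform_onto_tags_alt (lst : List String) : List String :=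
  bLoop lst (closersOf lst) 0 (List.replicate lst.length "O") lst.length

-- ===== PRECONDITION & SPEC =====
-- Python A evaluates lst[i][0] on every token, so it raises IndexError whenever some
-- token is the empty string; Pre_ excludes exactly those inputs.
def Pre_transform_onto_tags (lst : List String) : Prop := ∀ s ∈ lst, s ≠ ""
instance (lst : List String) : Decidable (Pre_transform_onto_tags lst) := by
  unfold Pre_transform_onto_tags; infer_instance
def pvWitness_transform_onto_tags : List String := ["(NP*", "*", "*)", "the", "(VB)"]

def Spec_transform_onto_tags (lst : List String) (out : List String) : Prop := out = transform_onto_tags_alt lst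
instance (lst : List String) (out : List String) : Decidable (Spec_transform_onto_tags lst out) := by unfold Spec_transform_onto_tags; infer_instance

-- ===== CLAIM (what is proved, stated in full; the proofs are below) =====
def Claim_equal_transform_onto_tags : Prop := ∀ (lst : List String), Dom_transform_onto_tags lst → Pre_transform_onto_tags lst → Spec_transform_onto_tags lst (transform_onto_tags lst)

-- ===== LEMMAS AND PROOFS =====

-- tok[-1] == ')'  ↔  tok.endswith(')')
theorem last_eq_endswith (tok : String) :
    (PySem.Str.pyGet? tok (-1) == some ')') = PySem.Str.endswith tok ")" := by
  rw [Bool.eq_iff_iff]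
  simp [PySem.Str.pyGet?, PySem.List.pyGet?_neg_one, PySem.Str.endswith, PySem.Chars.endswith,
    List.isSuffixOf_iff_suffix, List.getLast?_eq_some_iff]
  constructor <;> rintro ⟨ys, h⟩ <;> exact ⟨ys, h.symm⟩

theorem find?_congr_mem {α : Type} (l : List α) (p q : α → Bool)
    (h : ∀ x ∈ l, p x = q x) : l.find? p = l.find? q := by
  induction l with
  | nil => rfl
  | cons a t ih =>
      have ha := h a (by simp)
      rw [List.find?_cons, List.find?_cons, ha, ih (fun x hx => h x (by simp [hx]))]

theorem sorted_find?_self (i : Nat) : ∀ (l : List Nat), l.Pairwise (· < ·) → i ∈ l →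
    l.find? (fun j => decide (i ≤ j)) = some i := by
  intro l
  induction l with
  | nil => simp
  | cons a t ih =>
      intro hp hm
      rcases List.mem_cons.1 hm with h | h
      · subst h; simp
      · have hai : a < i := (List.pairwise_cons.1 hp).1 i h
        rw [List.find?_cons]
        have : (decide (i ≤ a)) = false := by simp; omega
        rw [this]
        exact ih (List.pairwise_cons.1 hp).2 h

theorem find?_shift (i : Nat) (l : List Nat) (hni : i ∉ l) :
    l.find? (fun j => decide (i ≤ j)) = l.find? (fun j => decide (i + 1 ≤ j)) := by
  apply find?_congr_mem
  intro x hx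
  have : x ≠ i := fun h => hni (h ▸ hx)
  simp only [decide_eq_decide]; omega

theorem closers_pairwise (lst : List String) : (closersOf lst).Pairwise (· < ·) :=
  (List.pairwise_lt_range).filter _

theorem mem_closers (lst : List String) (j : Nat) :
    j ∈ closersOf lst ↔ j < lst.length ∧
      (PySem.Str.startswith (lst.getD j "") "*" && PySem.Str.endswith (lst.getD j "") ")") = true := by
  unfold closersOf
  rw [List.mem_filter, List.mem_range]

theorem find?_none_of_ge (lst : List String) (i : Nat) (h : lst.length ≤ i) :
    (closersOf lst).find? (fun j => decide (i ≤ j)) = none := by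
  rw [List.find?_eq_none]
  intro j hj
  have := ((mem_closers lst j).1 hj).1
  simp; omega

theorem paint_cons (lst : List String) (tag : String) (lo hi : Nat) (tags : List String)
    (h : lo ≤ hi) :
    paint lst tag lo hi tags =
      paint lst tag (lo+1) hi
        (if PySem.Str.startswith (lst.getD lo "") "*" then tags.set lo ("I-" ++ tag) else tags) := by
  unfold paint
  have h1 : hi + 1 - lo = (hi + 1 - (lo+1)) + 1 := by omega
  rw [h1, List.range'_succ, List.foldl_cons]

theorem paint_empty (lst : List String) (tag : String) (lo hi : Nat) (tags : List String)
    (h : hi < lo) : paint lst tag lo hi tags = tags := by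
  unfold paint
  have : hi + 1 - lo = 0 := by omega
  rw [this]; rfl

theorem bLoop_out (lst : List String) (closers : List Nat) (p : Nat) (tags : List String)
    (fuel : Nat) (h : lst.length ≤ p) : bLoop lst closers p tags fuel = tags := by
  cases fuel with
  | zero => rfl
  | succ f => rw [bLoop]; simp [Nat.not_lt.2 h]

-- A's loop with flag = True when a closer exists at or after i: it paints 'I-'+cur on
-- the '*'-tokens up to that closer e, then resumes with flag = False at e+1.
theorem inner_some (lst : List String) : ∀ (k i e : Nat) (tags : List String) (cur : String),
    1 ≤ i → lst.length - i ≤ k →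
    (closersOf lst).find? (fun j => decide (i ≤ j)) = some e →
    aLoop lst (List.range' i (lst.length - i)) tags true cur =
      aLoop lst (List.range' (e+1) (lst.length - (e+1))) (paint lst cur i e tags) false cur := by
  intro k
  induction k with
  | zero =>
      intro i e tags cur h1 hk hfind
      rw [find?_none_of_ge lst i (by omega)] at hfind
      exact absurd hfind (by simp)
  | succ k ih =>
      intro i e tags cur h1 hk hfind
      by_cases hi : i < lst.length
      case neg =>
        rw [find?_none_of_ge lst i (by omega)] at hfind
        exact absurd hfind (by simp)
      case pos =>
      have hie : i ≤ e := by
        have := List.find?_some hfind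
        simpa using this
      have hr : lst.length - i = (lst.length - (i + 1)) + 1 := by omega
      rw [hr, List.range'_succ, aLoop]
      simp only [Bool.not_true, Bool.and_false, Bool.false_eq_true, if_false, Bool.true_and,
        bne, last_eq_endswith]
      by_cases hstar : PySem.Str.startswith (lst.getD i "") "*" = true
      · by_cases hend : PySem.Str.endswith (lst.getD i "") ")" = true
        · -- i is itself a closer, so e = i and the span ends here
          have hmem : i ∈ closersOf lst :=
            (mem_closers lst i).2 ⟨hi, by rw [hstar, hend]; rfl⟩
          have : (closersOf lst).find? (fun j => decide (i ≤ j)) = some i :=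
            sorted_find?_self i (closersOf lst) (closers_pairwise lst) hmem
          rw [hfind] at this
          have hei : e = i := Option.some.inj this
          subst hei
          rw [if_pos hstar, if_pos hend, paint_cons lst cur e e tags le_rfl, if_pos hstar,
            paint_empty _ _ _ _ _ (by omega)]
        · -- '*'-token that does not close: paint it and continue inside the span
          have hni : i ∉ closersOf lst := by
            intro hmem
            have h2 := ((mem_closers lst i).1 hmem).2
            rw [Bool.and_eq_true] at h2
            exact hend h2.2
          rw [if_pos hstar, if_neg hend,
            ih (i+1) e (tags.set i ("I-" ++ cur)) cur (by omega) (by omega)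
              (by rw [← find?_shift i _ hni]; exact hfind),
            paint_cons lst cur i e tags hie, if_pos hstar]
      · -- non-'*' token: stays 'O', span stays open
        have hni : i ∉ closersOf lst := by
          intro hmem
          have h2 := ((mem_closers lst i).1 hmem).2
          rw [Bool.and_eq_true] at h2
          exact hstar h2.1
        rw [if_neg hstar,
          ih (i+1) e tags cur (by omega) (by omega)
            (by rw [← find?_shift i _ hni]; exact hfind),
          paint_cons lst cur i e tags hie, if_neg hstar]

-- A's loop with flag = True when no closer remains: it paints to the end of the list.
theorem inner_none (lst : List String) : ∀ (k i : Nat) (tags : List String) (cur : String),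
    1 ≤ i → lst.length - i ≤ k →
    (closersOf lst).find? (fun j => decide (i ≤ j)) = none →
    aLoop lst (List.range' i (lst.length - i)) tags true cur =
      paint lst cur i (lst.length - 1) tags := by
  intro k
  induction k with
  | zero =>
      intro i tags cur h1 hk _
      have h0 : lst.length - i = 0 := by omega
      rw [h0, paint_empty lst cur i (lst.length - 1) tags (by omega)]
      rfl
  | succ k ih =>
      intro i tags cur h1 hk hfind
      by_cases hi : i < lst.length
      case neg =>
        have h0 : lst.length - i = 0 := by omega
        rw [h0, paint_empty lst cur i (lst.length - 1) tags (by omega)]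
        rfl
      case pos =>
      have hni : i ∉ closersOf lst := by
        intro hmem
        have := sorted_find?_self i (closersOf lst) (closers_pairwise lst) hmem
        rw [hfind] at this
        exact absurd this (by simp)
      have hr : lst.length - i = (lst.length - (i + 1)) + 1 := by omega
      rw [hr, List.range'_succ, aLoop]
      simp only [Bool.not_true, Bool.and_false, Bool.false_eq_true, if_false, Bool.true_and,
        bne, last_eq_endswith]
      by_cases hstar : PySem.Str.startswith (lst.getD i "") "*" = true
      · have hend : ¬ PySem.Str.endswith (lst.getD i "") ")" = true := by
          intro hend
          exact hni ((mem_closers lst i).2 ⟨hi, by rw [hstar, hend]; rfl⟩)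
        rw [if_pos hstar, if_neg hend,
          ih (i+1) (tags.set i ("I-" ++ cur)) cur (by omega) (by omega)
            (by rw [← find?_shift i _ hni]; exact hfind),
          paint_cons lst cur i (lst.length - 1) tags (by omega), if_pos hstar]
      · rw [if_neg hstar,
          ih (i+1) tags cur (by omega) (by omega)
            (by rw [← find?_shift i _ hni]; exact hfind),
          paint_cons lst cur i (lst.length - 1) tags (by omega), if_neg hstar]

theorem outer_eq (lst : List String) : ∀ (fuel i : Nat) (tags : List String) (cur : String),
    lst.length ≤ i + fuel →
    aLoop lst (List.range' i (lst.length - i)) tags false cur =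
      bLoop lst (closersOf lst) i tags fuel := by
  intro fuel
  induction fuel with
  | zero =>
      intro i tags cur h
      have h0 : lst.length - i = 0 := by omega
      rw [h0, bLoop]
      rfl
  | succ fuel ih =>
      intro i tags cur h
      by_cases hi : i < lst.length
      case neg =>
        have h0 : lst.length - i = 0 := by omega
        rw [h0, bLoop]
        simp [hi, aLoop]
      case pos =>
      have hr : lst.length - i = (lst.length - (i + 1)) + 1 := by omega
      rw [hr, List.range'_succ, aLoop, bLoop]
      simp only [hi, if_true, Bool.not_false, Bool.and_true, bne, last_eq_endswith]
      by_cases hopen : (PySem.Str.pyGet? (lst.getD i "") 0 == some '(') = true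
      · simp only [hopen, if_true]
        by_cases hend : PySem.Str.endswith (lst.getD i "") ")" = true
        · simp only [hend, Bool.not_true, Bool.false_eq_true, if_false, if_true]
          exact ih (i+1) _ _ (by omega)
        · simp only [hend, Bool.not_false, if_true, Bool.false_eq_true, if_false]
          have hsh : (closersOf lst).find? (fun j => decide (i < j))
              = (closersOf lst).find? (fun j => decide (i + 1 ≤ j)) := by
            apply find?_congr_mem; intro x _; simp only [decide_eq_decide]; omega
          rw [hsh]
          cases hfind : (closersOf lst).find? (fun j => decide (i + 1 ≤ j)) with
          | some e =>
              have he1 : i + 1 ≤ e := by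
                have := List.find?_some hfind
                simpa using this
              rw [inner_some lst (lst.length - (i+1)) (i+1) e _ _ (by omega) le_rfl hfind,
                Option.getD_some]
              exact ih (e+1) _ _ (by omega)
          | none =>
              rw [inner_none lst (lst.length - (i+1)) (i+1) _ _ (by omega) le_rfl hfind,
                Option.getD_none, bLoop_out lst _ _ _ fuel (by omega)]
      · simp only [Bool.not_eq_true] at hopen
        simp only [hopen, Bool.false_eq_true, if_false]
        exact ih (i+1) tags cur (by omega)

-- ===== VERDICT (by name: the statement is the Claim_ definition above) =====
theorem transform_onto_tags_spec : Claim_equal_transform_onto_tags := by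
  intro lst _ _
  unfold Spec_transform_onto_tags transform_onto_tags transform_onto_tags_alt
  have := outer_eq lst lst.length 0 (List.replicate lst.length "O") "O" (by omega)
  simpa [List.range_eq_range'] using this
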